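-- pv_equiv track=rewrite | github.com/DaRealDotZ/ShadowWizardBot | Source/utility.py | get_all_caps
-- ===== SOURCE A (Python) =====
-- import itertools
--
-- def get_all_caps(string):
--   lu_sequence = ((c.lower(), c.upper()) for c in string)
--   array = [''.join(x) for x in itertools.product(*lu_sequence)]
--   returnArray = []
--
--   for v in array:
--     if (v != string.lower()):
--       returnArray.insert(len(returnArray)+1,v)
--
--   return returnArray
-- ===== SOURCE B (Python) =====
-- def get_all_caps(string):
--   def helper(index, prefix):
--     if index == len(string):
--       return [prefix]
--     c = string[index]
--     return helper(index + 1, prefix + c.lower()) + helper(index + 1, prefix + c.upper())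
--   return [v for v in helper(0, '') if v != string.lower()]
-- ===== Notes on version B (the rewrite author's own statement) =====
-- stated objective: alternative
-- what changed: Replaces itertools.product plus an append loop with an explicit binary recursion over character positions (lowercase branch before uppercase) followed by a filter comprehension dropping the all-lowercase string.
import Mathlib
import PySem

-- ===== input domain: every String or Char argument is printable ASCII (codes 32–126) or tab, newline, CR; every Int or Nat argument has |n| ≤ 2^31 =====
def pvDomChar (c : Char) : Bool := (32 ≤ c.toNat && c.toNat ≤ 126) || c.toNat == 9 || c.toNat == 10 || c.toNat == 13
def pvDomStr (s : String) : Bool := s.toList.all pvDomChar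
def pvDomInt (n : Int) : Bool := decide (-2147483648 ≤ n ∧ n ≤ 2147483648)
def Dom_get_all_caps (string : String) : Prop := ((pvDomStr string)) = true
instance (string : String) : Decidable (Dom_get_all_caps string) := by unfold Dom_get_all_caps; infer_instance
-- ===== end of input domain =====

-- B replaces itertools.product + append loop with an explicit binary recursion over
-- character positions followed by a filter (alternative decomposition, same cost).


-- ===== PORT A =====
-- itertools.product(*lists), last factor fastest (exact for finite list arguments)
def pyProduct : List (List Char) → List (List Char)
  | [] => [[]]
  | l :: ls => l.flatMap (fun x => (pyProduct ls).map (x :: ·))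

def get_all_caps (string : String) : List String :=
  let lu_sequence := string.toList.map (fun c => [PySem.Chars.lowerChar c, PySem.Chars.upperChar c])
  let array := (pyProduct lu_sequence).map (fun x => String.ofList x)
  -- returnArray.insert(len(returnArray)+1, v) appends at the end
  array.foldl (fun acc v => if v ≠ PySem.Str.lower string then acc ++ [v] else acc) []

-- ===== PORT B =====
def altHelper : List Char → List Char → List String
  | prefixAcc, [] => [String.ofList prefixAcc]
  | prefixAcc, c :: rest =>
      altHelper (prefixAcc ++ [PySem.Chars.lowerChar c]) rest ++
      altHelper (prefixAcc ++ [PySem.Chars.upperChar c]) rest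

def get_all_caps_alt (string : String) : List String :=
  (altHelper [] string.toList).filter (fun v => v != PySem.Str.lower string)

-- ===== PRECONDITION & SPEC =====
def Spec_get_all_caps (string : String) (out : List String) : Prop := out = get_all_caps_alt string
instance (string : String) (out : List String) : Decidable (Spec_get_all_caps string out) := by unfold Spec_get_all_caps; infer_instance

-- ===== CLAIM (what is proved, stated in full; the proofs are below) =====
def Claim_equal_get_all_caps : Prop := ∀ (string : String), Dom_get_all_caps string → Spec_get_all_caps string (get_all_caps string)

-- ===== LEMMAS AND PROOFS =====
-- B's recursion enumerates exactly A's product, in the same order.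
theorem altHelper_eq_product (cs : List Char) : ∀ (acc : List Char),
    altHelper acc cs =
      (pyProduct (cs.map (fun c => [PySem.Chars.lowerChar c, PySem.Chars.upperChar c]))).map
        (fun x => String.ofList (acc ++ x)) := by
  induction cs with
  | nil => intro acc; simp [altHelper, pyProduct]
  | cons c rest ih =>
      intro acc
      simp [altHelper, pyProduct, ih, List.map_append, Function.comp_def,
            List.append_assoc]

-- ===== VERDICT (by name: the statement is the Claim_ definition above) =====
theorem get_all_caps_spec : Claim_equal_get_all_caps := by
  intro s _
  unfold Spec_get_all_caps get_all_caps get_all_caps_alt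
  rw [PySem.List.foldl_append_ite_eq_filter, altHelper_eq_product]
  simp only [List.nil_append]
  congr 1
  funext v
  simp only [bne]
  rw [Bool.eq_iff_iff]
  simp
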